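-- pv_equiv track=rewrite | github.com/susmitha-ai/resume_relevance_checker | scoring/feedback.py | generate_template_feedback
-- ===== SOURCE A (Python) =====
-- from typing import Dict, List, Optional
--
-- def generate_template_feedback(missing_skills: List[str]) -> str:
--     """
--     Generate feedback using predefined templates.
--
--     Args:
--         missing_skills: List of missing skills
--
--     Returns:
--         Template-based feedback
--     """
--     if not missing_skills:
--         return "Your resume looks strong! Consider adding more specific achievements and metrics."
--
--
--     technical_skills = []
--     soft_skills = []
--     tools = []
--
--     for skill in missing_skills[:3]:
--         skill_lower = skill.lower()
--         if any(tech in skill_lower for tech in ['python', 'java', 'javascript', 'sql', 'machine learning', 'data']):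
--             technical_skills.append(skill)
--         elif any(tool in skill_lower for tool in ['git', 'docker', 'aws', 'kubernetes', 'jenkins']):
--             tools.append(skill)
--         else:
--             soft_skills.append(skill)
--
--
--     if technical_skills:
--         skill = technical_skills[0]
--         return f"Complete a 2-week project demonstrating {skill} and showcase it on GitHub with detailed documentation."
--
--     elif tools:
--         tool = tools[0]
--         return f"Set up a personal project using {tool} and document the process to demonstrate hands-on experience."
--
--     elif soft_skills:
--         skill = soft_skills[0]
--         return f"Add a section highlighting {skill} with specific examples from your experience and quantify your impact."
--
--     else:
--         return f"Focus on developing skills in {', '.join(missing_skills[:2])} through online courses and practical projects."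
-- ===== SOURCE B (Python) =====
-- TECH_KEYWORDS = ['python', 'java', 'javascript', 'sql', 'machine learning', 'data']
-- TOOL_KEYWORDS = ['git', 'docker', 'aws', 'kubernetes', 'jenkins']
--
--
-- def generate_template_feedback(missing_skills):
--     if not missing_skills:
--         return "Your resume looks strong! Consider adding more specific achievements and metrics."
--     head = missing_skills[:3]
--     for skill in head:
--         if any(t in skill.lower() for t in TECH_KEYWORDS):
--             return f"Complete a 2-week project demonstrating {skill} and showcase it on GitHub with detailed documentation."
--     for skill in head:
--         if any(t in skill.lower() for t in TOOL_KEYWORDS):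
--             return f"Set up a personal project using {skill} and document the process to demonstrate hands-on experience."
--     return f"Add a section highlighting {missing_skills[0]} with specific examples from your experience and quantify your impact."
-- ===== Notes on version B (the rewrite author's own statement) =====
-- stated objective: simpler
-- what changed: Replaced the classify-into-three-lists pass plus branch chain by two direct first-match scans over the first three skills (technical first, then tools), falling back to the soft-skill template on the first skill; the unreachable else branch disappears.
import Mathlib
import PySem

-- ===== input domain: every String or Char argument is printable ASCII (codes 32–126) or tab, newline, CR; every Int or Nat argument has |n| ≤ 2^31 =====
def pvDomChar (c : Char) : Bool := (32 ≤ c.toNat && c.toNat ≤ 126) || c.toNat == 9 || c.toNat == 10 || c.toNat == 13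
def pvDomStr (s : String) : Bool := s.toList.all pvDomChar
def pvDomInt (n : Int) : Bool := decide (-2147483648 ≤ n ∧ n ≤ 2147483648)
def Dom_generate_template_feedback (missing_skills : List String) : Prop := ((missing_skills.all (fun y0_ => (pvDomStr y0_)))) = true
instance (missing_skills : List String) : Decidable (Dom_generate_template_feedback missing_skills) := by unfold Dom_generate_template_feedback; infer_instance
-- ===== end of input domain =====

-- B replaces A's classify-into-three-lists pass and branch chain by two direct
-- first-match scans (technical, then tools) over the first three skills, with the
-- soft-skill template on the first skill as fallback (objective: simpler).

-- shared keyword tests: any(kw in skill.lower() for kw in …)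
def pvIsTech (skill : String) : Bool :=
  ["python", "java", "javascript", "sql", "machine learning", "data"].any
    (fun t => PySem.Str.isIn t (PySem.Str.lower skill))

def pvIsTool (skill : String) : Bool :=
  ["git", "docker", "aws", "kubernetes", "jenkins"].any
    (fun t => PySem.Str.isIn t (PySem.Str.lower skill))

-- ===== PORT A =====
def generate_template_feedback (missing_skills : List String) : String :=
  if missing_skills = [] then
    "Your resume looks strong! Consider adding more specific achievements and metrics."
  else
    -- for skill in missing_skills[:3]: classify into technical_skills / tools / soft_skills
    let st :=
      (PySem.List.slice missing_skills none (some 3)).foldl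
        (fun (acc : List String × List String × List String) skill =>
          if pvIsTech skill then (acc.1 ++ [skill], acc.2.1, acc.2.2)
          else if pvIsTool skill then (acc.1, acc.2.1 ++ [skill], acc.2.2)
          else (acc.1, acc.2.1, acc.2.2 ++ [skill]))
        ([], [], [])
    match st.1 with
    | skill :: _ =>
        "Complete a 2-week project demonstrating " ++ skill ++ " and showcase it on GitHub with detailed documentation."
    | [] =>
      match st.2.1 with
      | tool :: _ =>
          "Set up a personal project using " ++ tool ++ " and document the process to demonstrate hands-on experience."
      | [] =>
        match st.2.2 with
        | skill :: _ =>
            "Add a section highlighting " ++ skill ++ " with specific examples from your experience and quantify your impact."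
        | [] =>
            "Focus on developing skills in " ++
              PySem.Str.join ", " (PySem.List.slice missing_skills none (some 2)) ++
              " through online courses and practical projects."

-- ===== PORT B =====
def generate_template_feedback_alt (missing_skills : List String) : String :=
  if missing_skills = [] then
    "Your resume looks strong! Consider adding more specific achievements and metrics."
  else
    let head := PySem.List.slice missing_skills none (some 3)
    match head.find? pvIsTech with
    | some skill =>
        "Complete a 2-week project demonstrating " ++ skill ++ " and showcase it on GitHub with detailed documentation."
    | none =>
      match head.find? pvIsTool with
      | some skill =>
          "Set up a personal project using " ++ skill ++ " and document the process to demonstrate hands-on experience."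
      | none =>
          "Add a section highlighting " ++ missing_skills.headI ++ " with specific examples from your experience and quantify your impact."

-- ===== PRECONDITION & SPEC =====
def Spec_generate_template_feedback (missing_skills : List String) (out : String) : Prop := out = generate_template_feedback_alt missing_skills
instance (missing_skills : List String) (out : String) : Decidable (Spec_generate_template_feedback missing_skills out) := by unfold Spec_generate_template_feedback; infer_instance

-- ===== CLAIM (what is proved, stated in full; the proofs are below) =====
def Claim_equal_generate_template_feedback : Prop := ∀ (missing_skills : List String), Dom_generate_template_feedback missing_skills → Spec_generate_template_feedback missing_skills (generate_template_feedback missing_skills)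

-- ===== LEMMAS AND PROOFS =====

-- A's classification fold computes three filters of its input list.
theorem pv_fold_eq_filters (l a b c : List String) :
    l.foldl
      (fun (acc : List String × List String × List String) skill =>
        if pvIsTech skill then (acc.1 ++ [skill], acc.2.1, acc.2.2)
        else if pvIsTool skill then (acc.1, acc.2.1 ++ [skill], acc.2.2)
        else (acc.1, acc.2.1, acc.2.2 ++ [skill]))
      (a, b, c)
    = (a ++ l.filter pvIsTech,
       b ++ l.filter (fun s => !pvIsTech s && pvIsTool s),
       c ++ l.filter (fun s => !pvIsTech s && !pvIsTool s)) := by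
  induction l generalizing a b c with
  | nil => simp
  | cons x xs ih =>
    by_cases h1 : pvIsTech x = true
    · simp [List.foldl_cons, h1, ih]
    · by_cases h2 : pvIsTool x = true
      · simp [List.foldl_cons, h1, h2, ih]
      · simp [List.foldl_cons, h1, h2, ih]

-- ===== VERDICT (by name: the statement is the Claim_ definition above) =====
theorem generate_template_feedback_spec : Claim_equal_generate_template_feedback := by
  unfold Claim_equal_generate_template_feedback
  intro ms _
  unfold Spec_generate_template_feedback generate_template_feedback generate_template_feedback_alt
  cases ms with
  | nil => simp
  | cons x xs =>
    simp only [reduceCtorEq, if_false]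
    rw [pv_fold_eq_filters]
    simp only [List.nil_append]
    set l := PySem.List.slice (x :: xs) none (some 3) with hl
    have hl3 : l = (x :: xs).take 3 := by
      rw [hl]
      exact_mod_cast PySem.List.slice_to_natCast (x :: xs) 3
    -- first branch: technical
    rw [← List.head?_filter, ← List.head?_filter]
    cases hT : l.filter pvIsTech with
    | cons s t => simp
    | nil =>
      have hTe : ∀ s ∈ l, pvIsTech s = false := by
        intro s hs
        by_contra hc
        have : s ∈ l.filter pvIsTech := List.mem_filter.mpr ⟨hs, by simpa using hc⟩
        simp [hT] at this
      have hcongr : l.filter (fun s => !pvIsTech s && pvIsTool s) = l.filter pvIsTool := by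
        apply List.filter_congr
        intro s hs; simp [hTe s hs]
      rw [hcongr]
      cases hO : l.filter pvIsTool with
      | cons s t => simp
      | nil =>
        have hOe : ∀ s ∈ l, pvIsTool s = false := by
          intro s hs
          by_contra hc
          have : s ∈ l.filter pvIsTool := List.mem_filter.mpr ⟨hs, by simpa using hc⟩
          simp [hO] at this
        have hsoft : l.filter (fun s => !pvIsTech s && !pvIsTool s) = l := by
          apply List.filter_eq_self.mpr
          intro s hs; simp [hTe s hs, hOe s hs]
        rw [hsoft, hl3]
        simp [List.take_succ_cons]
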